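-- pv_equiv track=rewrite | github.com/AdamZhouSE/pythonHomework | Code/CodeRecords/2815/60797/290280.py | find
-- ===== SOURCE A (Python) =====
-- def find(n, data):
--     re=0
--     for item in data:
--         if item>0:
--             re += item - 1
--         elif item<0:
--             re += -1 - item
--         else:
--             re += 1
--     return re
-- ===== SOURCE B (Python) =====
-- def find(n, data):
--     # Group equal values first: build a histogram, then aggregate once per
--     # DISTINCT value with its multiplicity (dict grouping instead of a
--     # per-element branch accumulation).
--     freq = {}
--     for x in data:
--         freq[x] = freq.get(x, 0) + 1
--     total = 0
--     for v, c in freq.items():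
--         if v > 0:
--             total += c * (v - 1)
--         elif v < 0:
--             total += c * (-1 - v)
--         else:
--             total += c
--     return total
-- ===== Notes on version B (the rewrite author's own statement) =====
-- stated objective: alternative
-- what changed: B builds a frequency dictionary (histogram) over the data and then aggregates once per distinct value weighted by its multiplicity, instead of A's per-element three-way branch accumulation.
import Mathlib
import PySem

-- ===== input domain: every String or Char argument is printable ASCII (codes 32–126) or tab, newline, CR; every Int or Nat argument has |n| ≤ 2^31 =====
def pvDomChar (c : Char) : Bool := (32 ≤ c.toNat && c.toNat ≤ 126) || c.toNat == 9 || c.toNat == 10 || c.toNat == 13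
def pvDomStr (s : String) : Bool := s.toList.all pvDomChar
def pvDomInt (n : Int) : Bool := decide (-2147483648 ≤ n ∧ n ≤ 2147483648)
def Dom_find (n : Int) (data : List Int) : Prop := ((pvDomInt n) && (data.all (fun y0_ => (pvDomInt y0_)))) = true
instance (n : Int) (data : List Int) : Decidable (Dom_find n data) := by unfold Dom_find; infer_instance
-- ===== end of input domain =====

-- B groups equal values with a frequency dictionary and aggregates once per distinct value; same O(n) cost, different structure.


-- ===== PORT A =====
def find (n : Int) (data : List Int) : Int :=
  data.foldl (fun re item =>
    if item > 0 then re + (item - 1)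
    else if item < 0 then re + (-1 - item)
    else re + 1) 0

-- ===== PORT B =====
def find_alt (n : Int) (data : List Int) : Int :=
  let freq := data.foldl (fun d x => d.insert x (d.getD x 0 + 1)) (PySem.Dict.empty : PySem.Dict Int Int)
  freq.items.foldl (fun total p =>
    if p.1 > 0 then total + p.2 * (p.1 - 1)
    else if p.1 < 0 then total + p.2 * (-1 - p.1)
    else total + p.2) 0

-- ===== PRECONDITION & SPEC =====
def Spec_find (n : Int) (data : List Int) (out : Int) : Prop := out = find_alt n data
instance (n : Int) (data : List Int) (out : Int) : Decidable (Spec_find n data out) := by unfold Spec_find; infer_instance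

-- ===== CLAIM (what is proved, stated in full; the proofs are below) =====
def Claim_equal_find : Prop := ∀ (n : Int) (data : List Int), Dom_find n data → Spec_find n data (find n data)

-- ===== LEMMAS AND PROOFS =====

-- per-element contribution both programs accumulate
def pvW (x : Int) : Int := if x > 0 then x - 1 else if x < 0 then -1 - x else 1

theorem find_eq_sum (n : Int) (data : List Int) :
    find n data = (data.map pvW).sum := by
  unfold find
  have h : (fun (re item : Int) =>
      if item > 0 then re + (item - 1)
      else if item < 0 then re + (-1 - item)
      else re + 1) = fun re item => re + pvW item := by
    funext re item; unfold pvW; split_ifs <;> rfl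
  rw [h, PySem.List.foldl_add]
  simp

theorem sum_count_mul (data : List Int) :
    ((PySem.Set.ofList data).map (fun k => (data.count k : Int) * pvW k)).sum
      = (data.map pvW).sum := by
  have hnd : (PySem.Set.ofList data).Nodup := PySem.Set.nodup_ofList data
  have hfin : (PySem.Set.ofList data).toFinset = data.toFinset := by
    ext x; simp [PySem.Set.mem_ofList]
  rw [← List.sum_toFinset _ hnd, hfin, Finset.sum_list_map_count]
  simp

theorem find_alt_eq_sum (n : Int) (data : List Int) :
    find_alt n data = (data.map pvW).sum := by
  unfold find_alt
  rw [PySem.Dict.foldl_insert_getD_add_one_eq_counter]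
  have h : (fun (total : Int) (p : Int × Int) =>
      if p.1 > 0 then total + p.2 * (p.1 - 1)
      else if p.1 < 0 then total + p.2 * (-1 - p.1)
      else total + p.2) = fun total p => total + p.2 * pvW p.1 := by
    funext total p; unfold pvW; split_ifs <;> ring
  rw [h, PySem.List.foldl_add, PySem.Dict.items_counter]
  rw [List.map_map]
  simpa using sum_count_mul data

-- ===== VERDICT (by name: the statement is the Claim_ definition above) =====
theorem find_spec : Claim_equal_find := by
  intro n data _
  unfold Spec_find
  rw [find_eq_sum, find_alt_eq_sum]
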